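-- pv_equiv track=rewrite | github.com/robklaiss/industrias-feris | tesaka-cv/app/sifen_client/emisor_validator.py | _calc_ruc_dv_modulo11
-- ===== SOURCE A (Python) =====
-- def _calc_ruc_dv_modulo11(ruc_base: str) -> int:
--     """
--     Calcula el dígito verificador (DV) de un RUC paraguayo usando módulo 11.
--
--     Algoritmo oficial Paraguay (similar al CDC):
--     - Recorrer los dígitos del RUC desde la DERECHA hacia la IZQUIERDA
--     - Multiplicar cada dígito por un peso que va de 2 a 11 (y se reinicia a 2)
--     - Sumar todos los productos
--     - Si (total % 11) > 1: dv = 11 - (total % 11)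
--     - Si no: dv = 0
--
--     Args:
--         ruc_base: RUC sin DV (7-8 dígitos)
--
--     Returns:
--         DV calculado (0-9)
--     """
--     # Limpiar y obtener solo dígitos
--     digits = ''.join(c for c in str(ruc_base) if c.isdigit())
--     if not digits:
--         return 0
--
--     # Algoritmo módulo 11: pesos de 2 a 11, luego se reinicia a 2
--     base_max = 11
--     k = 2
--     total = 0
--
--     # Recorrer desde la derecha (último dígito primero)
--     for digit in reversed(digits):
--         if k > base_max:
--             k = 2
--         total += int(digit) * k
--         k += 1
--
--     # Calcular DV
--     remainder = total % 11
--     if remainder > 1: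
--         dv = 11 - remainder
--     else:
--         dv = 0
--
--     return dv
-- ===== SOURCE B (Python) =====
-- # Chunked table lookup: weights repeat with period 10, so consume the reversed
-- # digit string in 10-digit chunks, each dotted against a fixed weight table.
-- WEIGHTS = (2, 3, 4, 5, 6, 7, 8, 9, 10, 11)
--
--
-- def _calc_ruc_dv_modulo11(ruc_base: str) -> int:
--     digits = ''.join(c for c in str(ruc_base) if c.isdigit())
--
--     def tot(r):
--         if not r:
--             return 0
--         return sum(w * int(c) for w, c in zip(WEIGHTS, r[:10])) + tot(r[10:])
--
--     remainder = tot(digits[::-1]) % 11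
--     return 11 - remainder if remainder > 1 else 0
-- ===== Notes on version B (the rewrite author's own statement) =====
-- stated objective: alternative
-- what changed: The per-digit stateful weight counter (incremented and reset from 11 back to 2) is gone: B exploits the period-10 weight cycle by recursively consuming the reversed digit string in 10-digit chunks, each chunk dotted via zip against a fixed weight table (2..11); there is no counter and no per-digit weight computation.
import Mathlib
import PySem

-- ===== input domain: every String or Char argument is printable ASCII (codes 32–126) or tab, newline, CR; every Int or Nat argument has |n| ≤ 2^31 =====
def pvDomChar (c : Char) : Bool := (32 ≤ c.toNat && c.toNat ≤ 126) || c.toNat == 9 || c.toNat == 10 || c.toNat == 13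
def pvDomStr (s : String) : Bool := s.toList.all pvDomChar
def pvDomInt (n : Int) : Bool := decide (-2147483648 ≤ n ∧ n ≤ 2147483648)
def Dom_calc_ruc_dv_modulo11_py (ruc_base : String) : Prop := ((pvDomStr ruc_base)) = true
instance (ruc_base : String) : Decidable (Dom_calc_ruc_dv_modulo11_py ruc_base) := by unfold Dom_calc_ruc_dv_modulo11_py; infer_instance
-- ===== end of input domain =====

-- B replaces A's per-digit cycling weight counter by chunked recursion: the reversed
-- digit string is consumed 10 digits at a time, each chunk zipped against a fixed
-- weight table (2..11); same mod-11 finish. Alternative decomposition, same cost.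


-- ===== PORT A =====
-- int(d) for a single filtered digit character d (both Pythons do exactly this)
def pyDigitInt (c : Char) : Int := (PySem.Int.ofStr? (String.singleton c)).getD 0

def calc_ruc_dv_modulo11_py (ruc_base : String) : Int :=
  let digits := ruc_base.toList.filter (fun c => PySem.Chars.isdigit c)
  if digits = [] then 0
  else
    -- k cycles 2..11 (reset before use), total accumulates digit*k, right to left
    let st := digits.reverse.foldl (fun (s : Int × Int) d =>
      let k := if s.1 > 11 then (2 : Int) else s.1
      (k + 1, s.2 + pyDigitInt d * k)) ((2 : Int), (0 : Int))
    let remainder := PySem.Int.mod st.2 11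
    if remainder > 1 then 11 - remainder else 0

-- ===== PORT B =====
def pyWeights : List Int := [2, 3, 4, 5, 6, 7, 8, 9, 10, 11]

-- tot(r): dot the first 10 chars of r against WEIGHTS, recurse on the rest
def pyChunkTot (r : List Char) : Int :=
  if r = [] then 0
  else ((pyWeights.zip (r.take 10)).map (fun p => p.1 * pyDigitInt p.2)).sum
       + pyChunkTot (r.drop 10)
termination_by r.length
decreasing_by
  rename_i h
  have : 0 < r.length := List.length_pos_iff.mpr h
  simp [List.length_drop]; omega

def calc_ruc_dv_modulo11_py_alt (ruc_base : String) : Int :=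
  let digits := ruc_base.toList.filter (fun c => PySem.Chars.isdigit c)
  let remainder := PySem.Int.mod (pyChunkTot digits.reverse) 11
  if remainder > 1 then 11 - remainder else 0

-- ===== PRECONDITION & SPEC =====
def Spec_calc_ruc_dv_modulo11_py (ruc_base : String) (out : Int) : Prop := out = calc_ruc_dv_modulo11_py_alt ruc_base
instance (ruc_base : String) (out : Int) : Decidable (Spec_calc_ruc_dv_modulo11_py ruc_base out) := by unfold Spec_calc_ruc_dv_modulo11_py; infer_instance

-- ===== CLAIM (what is proved, stated in full; the proofs are below) =====
def Claim_equal_calc_ruc_dv_modulo11_py : Prop := ∀ (ruc_base : String), Dom_calc_ruc_dv_modulo11_py ruc_base → Spec_calc_ruc_dv_modulo11_py ruc_base (calc_ruc_dv_modulo11_py ruc_base)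

-- ===== LEMMAS AND PROOFS =====

-- A's loop body, named for the lemmas
def pyStepA (s : Int × Int) (d : Char) : Int × Int :=
  let k := if s.1 > 11 then (2 : Int) else s.1
  (k + 1, s.2 + pyDigitInt d * k)

theorem pyWeights_drop (j : Nat) (hj : j ≤ 9) :
    pyWeights.drop j = ((j : Int) + 2) :: pyWeights.drop (j + 1) := by
  interval_cases j <;> decide

-- within one chunk (no reset): fold from weight j+2 computes the zip dot product
theorem foldA_chunk (cs : List Char) : ∀ (j : Nat) (t : Int), cs.length + j ≤ 10 →
    cs.foldl pyStepA (((j : Int) + 2), t)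
      = (((j : Int) + 2 + cs.length),
         t + (((pyWeights.drop j).zip cs).map (fun p => p.1 * pyDigitInt p.2)).sum) := by
  induction cs with
  | nil => intro j t _; simp
  | cons c cs ih =>
      intro j t h
      have hj : j ≤ 9 := by simp at h; omega
      rw [List.foldl_cons]
      have hstep : pyStepA (((j : Int) + 2), t) c
          = (((j + 1 : Nat) : Int) + 2, t + pyDigitInt c * ((j : Int) + 2)) := by
        simp [pyStepA]
        constructor
        · omega
        · intro hgt; exfalso; omega
      rw [hstep, ih (j + 1) _ (by simp at h ⊢; omega)]
      rw [pyWeights_drop j hj, List.zip_cons_cons, List.map_cons, List.sum_cons]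
      simp only [Prod.mk.injEq, List.length_cons]
      refine ⟨by omega, by ring⟩

-- after 10 digits the counter hits 12 and resets: same fold as restarting at 2
theorem foldA_reset (cs : List Char) (t : Int) (h : cs ≠ []) :
    cs.foldl pyStepA ((12 : Int), t) = cs.foldl pyStepA ((2 : Int), t) := by
  match cs with
  | c :: cs' =>
      rw [List.foldl_cons, List.foldl_cons]
      norm_num [pyStepA]

-- the whole fold equals B's chunked recursion (strong induction on length)
theorem foldA_eq_chunkTot (n : Nat) : ∀ (l : List Char), l.length ≤ n → ∀ (t : Int),
    (l.foldl pyStepA ((2 : Int), t)).2 = t + pyChunkTot l := by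
  induction n with
  | zero =>
      intro l hl t
      have : l = [] := List.eq_nil_of_length_eq_zero (by omega)
      subst this; simp [pyChunkTot]
  | succ n ih =>
      intro l hl t
      by_cases hnil : l = []
      · subst hnil; simp [pyChunkTot]
      · rw [pyChunkTot]
        simp only [hnil, if_false]
        by_cases hlen : l.length ≤ 10
        · have hdrop : l.drop 10 = [] := by
            apply List.eq_nil_of_length_eq_zero; simp [List.length_drop]; omega
          have htake : l.take 10 = l := List.take_of_length_le hlen
          have := foldA_chunk l 0 t (by omega)
          simp only [Nat.cast_zero, zero_add] at this
          rw [this]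
          simp [hdrop, htake, pyChunkTot]
        · have hsplit : l = l.take 10 ++ l.drop 10 := (List.take_append_drop 10 l).symm
          conv_lhs => rw [hsplit]
          rw [List.foldl_append]
          have htlen : (l.take 10).length = 10 := by simp; omega
          have hfold10 := foldA_chunk (l.take 10) 0 t (by omega)
          simp only [Nat.cast_zero, zero_add, htlen] at hfold10
          rw [hfold10]
          have hdne : l.drop 10 ≠ [] := by
            intro hcontra
            have := congrArg List.length hcontra
            simp [List.length_drop] at this; omega
          have h12 : (2 : Int) + ((10 : Nat) : Int) = 12 := by norm_num
          rw [h12, foldA_reset _ _ hdne]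
          rw [ih (l.drop 10) (by simp [List.length_drop]; omega)]
          simp only [List.drop_zero]
          ring

theorem calc_ruc_dv_modulo11_py_eq (ruc_base : String) :
    calc_ruc_dv_modulo11_py ruc_base = calc_ruc_dv_modulo11_py_alt ruc_base := by
  unfold calc_ruc_dv_modulo11_py calc_ruc_dv_modulo11_py_alt
  by_cases h : ruc_base.toList.filter (fun c => PySem.Chars.isdigit c) = []
  · simp [h, pyChunkTot]
  · simp only [h, if_false]
    have hfold : (ruc_base.toList.filter (fun c => PySem.Chars.isdigit c)).reverse.foldl
        (fun (s : Int × Int) d =>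
          let k := if s.1 > 11 then (2 : Int) else s.1
          (k + 1, s.2 + pyDigitInt d * k)) ((2 : Int), (0 : Int))
        = (ruc_base.toList.filter (fun c => PySem.Chars.isdigit c)).reverse.foldl
            pyStepA ((2 : Int), (0 : Int)) := rfl
    rw [hfold, ]
    have := foldA_eq_chunkTot
      ((ruc_base.toList.filter (fun c => PySem.Chars.isdigit c)).reverse.length)
      ((ruc_base.toList.filter (fun c => PySem.Chars.isdigit c)).reverse) (le_refl _) 0
    rw [this]
    norm_num

-- ===== VERDICT (by name: the statement is the Claim_ definition above) =====
theorem calc_ruc_dv_modulo11_py_spec : Claim_equal_calc_ruc_dv_modulo11_py := by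
  intro ruc_base _
  unfold Spec_calc_ruc_dv_modulo11_py
  exact calc_ruc_dv_modulo11_py_eq ruc_base
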